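-- pv_equiv track=rewrite | github.com/DerDodo/AdventOfCode2015 | solutions/level20.py | level20_1
-- ===== SOURCE A (Python) =====
-- from collections import defaultdict
--
-- def level20_1(target_number: int) -> int:
--     target_number = target_number // 10
--     houses = defaultdict(int)
--     limit = min(1_000_000, target_number)
--     for house in range(1, limit):
--         for elf in range(1, limit // house + 1):
--             houses[house * elf] += elf
--         if houses[house] >= target_number:
--             return house
-- ===== SOURCE B (Python) =====
-- def level20_1(target_number: int) -> int:
--     target_number //= 10
--     limit = min(1_000_000, target_number)
--     for house in range(1, limit):
--         sigma = 0
--         d = 1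
--         while d * d <= house:
--             if house % d == 0:
--                 sigma += d
--                 q = house // d
--                 if q != d:
--                     sigma += q
--             d += 1
--         if sigma >= target_number:
--             return house
-- ===== Notes on version B (the rewrite author's own statement) =====
-- stated objective: simpler
-- what changed: Replaces the incremental defaultdict sieve (each house scatters elf-contributions to all its multiples) by a direct per-house divisor-sum via trial division up to sqrt(house), returning the first house whose divisor sum reaches the target; no dict and no nested scatter pass remain.
import Mathlib
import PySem

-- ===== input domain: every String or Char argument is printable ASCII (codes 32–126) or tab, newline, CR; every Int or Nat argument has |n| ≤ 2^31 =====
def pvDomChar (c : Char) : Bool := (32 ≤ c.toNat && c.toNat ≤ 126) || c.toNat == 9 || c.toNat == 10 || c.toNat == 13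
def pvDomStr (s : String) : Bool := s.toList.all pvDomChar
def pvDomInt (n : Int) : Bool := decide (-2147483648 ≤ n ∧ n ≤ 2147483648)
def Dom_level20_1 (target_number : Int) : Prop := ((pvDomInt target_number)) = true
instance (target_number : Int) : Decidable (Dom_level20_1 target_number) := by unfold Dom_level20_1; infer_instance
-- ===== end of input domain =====

-- ===== PORT A =====
-- B changes A's incremental dict sieve into a per-house trial-division divisor sum (objective: simpler).

-- A's loop body: for elf in range(1, limit // house + 1): houses[house * elf] += elf; then
-- check houses[house] >= target_number and return house, else continue with the next house.
def goA (hs : List Int) (limit t : Int) (houses : PySem.Dict Int Int) : Option Int :=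
  match hs with
  | [] => none
  | house :: rest =>
    let houses' := (PySem.List.pyRange 1 (PySem.Int.floordiv limit house + 1) 1).foldl
        (fun d elf => d.modify (house * elf) 0 (· + elf)) houses
    if houses'.getD house 0 ≥ t then some house else goA rest limit t houses'

def level20_1 (target_number : Int) : Option Int :=
  let t := PySem.Int.floordiv target_number 10
  let limit := min 1000000 t
  goA (PySem.List.pyRange 1 limit 1) limit t PySem.Dict.empty

-- ===== PORT B =====
-- while d * d <= house: if house % d == 0: sigma += d (+ quotient if distinct); d += 1
-- (d is the Python loop counter, always a positive integer, ported as Nat; `fuel` is only a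
-- structural termination bound for the while loop — house.toNat + 1 steps always suffice)
def sigmaLoop (fuel : Nat) (house : Int) (d : Nat) (acc : Int) : Int :=
  match fuel with
  | 0 => acc
  | fuel + 1 =>
    if (d : Int) * (d : Int) ≤ house then
      let acc' := if PySem.Int.mod house (d : Int) = 0 then
          let q := PySem.Int.floordiv house (d : Int)
          if q ≠ (d : Int) then acc + (d : Int) + q else acc + (d : Int)
        else acc
      sigmaLoop fuel house (d + 1) acc'
    else acc

def goB (hs : List Int) (t : Int) : Option Int :=
  match hs with
  | [] => none
  | house :: rest =>
    if sigmaLoop (house.toNat + 1) house 1 0 ≥ t then some house else goB rest t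

def level20_1_alt (target_number : Int) : Option Int :=
  let t := PySem.Int.floordiv target_number 10
  let limit := min 1000000 t
  goB (PySem.List.pyRange 1 limit 1) t

-- ===== PRECONDITION & SPEC =====
def Spec_level20_1 (target_number : Int) (out : Option Int) : Prop := out = level20_1_alt target_number
instance (target_number : Int) (out : Option Int) : Decidable (Spec_level20_1 target_number out) := by unfold Spec_level20_1; infer_instance

-- ===== CLAIM (what is proved, stated in full; the proofs are below) =====
def Claim_equal_level20_1 : Prop := ∀ (target_number : Int), Dom_level20_1 target_number → Spec_level20_1 target_number (level20_1 target_number)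

-- ===== LEMMAS AND PROOFS =====

-- ---- shared spec: the divisor sum, as a Nat ----
def sigN (n : Nat) : Nat := ∑ d ∈ n.divisors, d

-- ---- B side: sigmaLoop computes sigN ----

-- contribution of trial divisor e to the loop's accumulator
def contrib (n e : Nat) : Int :=
  if e ∣ n then (if n / e = e then (e : Int) else (e : Int) + ((n / e : Nat) : Int)) else 0

lemma sigmaLoop_inv (n : Nat) : ∀ (F d : Nat) (acc : Int), 1 ≤ d → Nat.sqrt n + 1 ≤ d + F →
    sigmaLoop F (n : Int) d acc = acc + ∑ e ∈ Finset.Icc d (Nat.sqrt n), contrib n e := by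
  intro F
  induction F with
  | zero =>
    intro d acc _ hF
    rw [sigmaLoop, Finset.Icc_eq_empty (by omega), Finset.sum_empty, add_zero]
  | succ F ih =>
    intro d acc hd1 hF
    by_cases hds : d ≤ Nat.sqrt n
    · have hdd : d * d ≤ n := Nat.le_sqrt.mp hds
      have hd0 : 0 < d := by omega
      have hcond : ((d : Nat) : Int) * ((d : Nat) : Int) ≤ ((n : Nat) : Int) := by exact_mod_cast hdd
      have hmodc : PySem.Int.mod ((n : Nat) : Int) ((d : Nat) : Int) = (((n % d : Nat)) : Int) :=
        PySem.Int.mod_natCast n d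
      have hfdc : PySem.Int.floordiv ((n : Nat) : Int) ((d : Nat) : Int) = (((n / d : Nat)) : Int) :=
        PySem.Int.floordiv_natCast n d
      have hicc : ∑ e ∈ Finset.Icc d (Nat.sqrt n), contrib n e
          = contrib n d + ∑ e ∈ Finset.Icc (d + 1) (Nat.sqrt n), contrib n e := by
        have hins : Finset.Icc d (Nat.sqrt n) = insert d (Finset.Icc (d + 1) (Nat.sqrt n)) := by
          ext x; simp only [Finset.mem_Icc, Finset.mem_insert]; omega
        have hnm : d ∉ Finset.Icc (d + 1) (Nat.sqrt n) := by
          simp only [Finset.mem_Icc]; omega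
        rw [hins, Finset.sum_insert hnm]
      rw [sigmaLoop, if_pos hcond, hicc]
      simp only [hmodc, hfdc]
      by_cases hdvd : d ∣ n
      · have hm0 : ((n % d : Nat) : Int) = 0 := by
          obtain ⟨c, rfl⟩ := hdvd
          have : d * c % d = 0 := Nat.mul_mod_right d c
          exact_mod_cast this
        rw [if_pos hm0]
        by_cases hq : n / d = d
        · have hqc : ((n / d : Nat) : Int) = ((d : Nat) : Int) := by exact_mod_cast hq
          rw [hqc, if_neg (by simp), ih (d + 1) _ (by omega) (by omega)]
          simp [contrib, hdvd, hq]
          ring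
        · have hqc : ((n / d : Nat) : Int) ≠ ((d : Nat) : Int) := by
            intro hcst; exact hq (by exact_mod_cast hcst)
          rw [if_pos hqc, ih (d + 1) _ (by omega) (by omega)]
          simp [contrib, hdvd, hq]
          ring
      · have hm0 : ((n % d : Nat) : Int) ≠ 0 := by
          have : n % d ≠ 0 := fun h => hdvd (Nat.dvd_of_mod_eq_zero h)
          exact_mod_cast this
        rw [if_neg hm0, ih (d + 1) acc (by omega) (by omega)]
        simp [contrib, hdvd]
    · have hnd : ¬ ((d : Int) * (d : Int) ≤ (n : Int)) := by
        intro hle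
        have hdn : d * d ≤ n := by exact_mod_cast hle
        have := Nat.le_sqrt.mpr hdn
        omega
      rw [sigmaLoop, if_neg hnd, Finset.Icc_eq_empty (by omega), Finset.sum_empty, add_zero]

lemma pairing (n : Nat) (hn : 1 ≤ n) :
    ∑ e ∈ Finset.Icc 1 (Nat.sqrt n), contrib n e = ((sigN n : Nat) : Int) := by
  have hn0 : n ≠ 0 := by omega
  have hA : (Finset.Icc 1 (Nat.sqrt n)).filter (fun e => e ∣ n)
      = n.divisors.filter (fun e => e * e ≤ n) := by
    ext x
    simp only [Finset.mem_filter, Finset.mem_Icc, Nat.mem_divisors]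
    constructor
    · rintro ⟨⟨hx1, hxs⟩, hdvd⟩
      exact ⟨⟨hdvd, hn0⟩, Nat.le_sqrt.mp hxs⟩
    · rintro ⟨⟨hdvd, -⟩, hxx⟩
      exact ⟨⟨Nat.pos_of_dvd_of_pos hdvd (by omega), Nat.le_sqrt.mpr hxx⟩, hdvd⟩
  have h1 : ∑ e ∈ Finset.Icc 1 (Nat.sqrt n), contrib n e
      = ∑ e ∈ n.divisors.filter (fun e => e * e ≤ n),
          (if n / e = e then (e : Int) else (e : Int) + ((n / e : Nat) : Int)) := by
    rw [← hA, Finset.sum_filter]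
    exact Finset.sum_congr rfl (fun e _ => rfl)
  rw [h1]
  have h2 : ∀ e ∈ n.divisors.filter (fun e => e * e ≤ n),
      (if n / e = e then (e : Int) else (e : Int) + ((n / e : Nat) : Int))
        = (e : Int) + (if ¬ (n / e = e) then ((n / e : Nat) : Int) else 0) := by
    intro e _
    by_cases hq : n / e = e <;> simp [hq]
  rw [Finset.sum_congr rfl h2, Finset.sum_add_distrib, ← Finset.sum_filter]
  have hbij : ∑ e ∈ (n.divisors.filter (fun e => e * e ≤ n)).filter (fun e => ¬ (n / e = e)),
      ((n / e : Nat) : Int) = ∑ k ∈ n.divisors.filter (fun k => ¬ (k * k ≤ n)), (k : Int) := by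
    apply Finset.sum_nbij' (i := fun e => n / e) (j := fun k => n / k)
    · intro e he
      simp only [Finset.mem_filter, Nat.mem_divisors] at he ⊢
      obtain ⟨⟨⟨hdvd, -⟩, hee⟩, hne⟩ := he
      have he1 : 0 < e := Nat.pos_of_dvd_of_pos hdvd (by omega)
      have hprod : e * (n / e) = n := Nat.mul_div_cancel' hdvd
      have hlt : e < n / e := by
        rcases lt_or_ge e (n / e) with h | h
        · exact h
        · exfalso
          have h1 : e * (n / e) ≤ e * e := Nat.mul_le_mul_left e h
          have h2 : n / e = e := Nat.eq_of_mul_eq_mul_left he1 (by omega)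
          exact hne h2
      refine ⟨⟨Nat.div_dvd_of_dvd hdvd, hn0⟩, ?_⟩
      have h4 : e * (n / e) < (n / e) * (n / e) :=
        mul_lt_mul_of_pos_right hlt (by omega)
      omega
    · intro k hk
      simp only [Finset.mem_filter, Nat.mem_divisors] at hk ⊢
      obtain ⟨⟨hdvd, -⟩, hkk⟩ := hk
      have hk1 : 0 < k := Nat.pos_of_dvd_of_pos hdvd (by omega)
      have hprod : k * (n / k) = n := Nat.mul_div_cancel' hdvd
      have hlt : n / k < k := by
        rcases lt_or_ge (n / k) k with h | h
        · exact h
        · exfalso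
          have h1 : k * k ≤ k * (n / k) := Nat.mul_le_mul_left k h
          omega
      have hdd : n / (n / k) = k := Nat.div_div_self hdvd hn0
      refine ⟨⟨⟨Nat.div_dvd_of_dvd hdvd, hn0⟩, ?_⟩, ?_⟩
      · have h1 : (n / k) * (n / k) ≤ (n / k) * k := Nat.mul_le_mul_left (n / k) (le_of_lt hlt)
        have h2 : (n / k) * k = n := by rw [Nat.mul_comm]; exact hprod
        omega
      · rw [hdd]; omega
    · intro e he
      simp only [Finset.mem_filter, Nat.mem_divisors] at he
      exact Nat.div_div_self he.1.1.1 hn0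
    · intro k hk
      simp only [Finset.mem_filter, Nat.mem_divisors] at hk
      exact Nat.div_div_self hk.1.1 hn0
    · intro e _
      rfl
  rw [hbij, Finset.sum_filter_add_sum_filter_not n.divisors (fun e => e * e ≤ n) (fun e => (e : Int))]
  rw [sigN, Nat.cast_sum]

lemma sigmaLoop_eq (n : Nat) (hn : 1 ≤ n) :
    sigmaLoop (n + 1) (n : Int) 1 0 = ((sigN n : Nat) : Int) := by
  have hs := Nat.sqrt_le_self n
  rw [sigmaLoop_inv n (n + 1) 1 0 le_rfl (by omega), pairing n hn, zero_add]

-- ---- A side: the dict entry at key h, after houses 1..h have been sieved, is sigN h ----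

def sieveStep (limit : Int) (D : PySem.Dict Int Int) (house : Int) : PySem.Dict Int Int :=
  (PySem.List.pyRange 1 (PySem.Int.floordiv limit house + 1) 1).foldl
    (fun d elf => d.modify (house * elf) 0 (· + elf)) D

def sievePrefix (limit h : Int) : PySem.Dict Int Int :=
  (PySem.List.pyRange 1 h 1).foldl (sieveStep limit) PySem.Dict.empty

def addA (limit k m : Int) : Int :=
  ((PySem.List.pyRange 1 (PySem.Int.floordiv limit k + 1) 1).filter (fun e => k * e == m)).sum

lemma getD_foldl_modify_mul (k m : Int) :
    ∀ (l : List Int) (D : PySem.Dict Int Int),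
      ((l.foldl (fun d e => d.modify (k * e) 0 (· + e)) D).getD m 0)
        = D.getD m 0 + (l.filter (fun e => k * e == m)).sum := by
  intro l
  induction l with
  | nil => intro D; simp
  | cons a l ih =>
    intro D
    rw [List.foldl_cons, ih, List.filter_cons]
    by_cases hc : k * a = m
    · simp only [hc, BEq.rfl, if_true, List.sum_cons,
        PySem.Dict.getD_modify]
      ring
    · have hbeq : (k * a == m) = false := by simp [hc]
      rw [hbeq, if_neg (by simp), PySem.Dict.getD_modify, if_neg (fun h => hc h.symm)]

lemma getD_sievePrefix_foldl (limit m : Int) :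
    ∀ (hs : List Int) (D : PySem.Dict Int Int),
      ((hs.foldl (sieveStep limit) D).getD m 0)
        = D.getD m 0 + (hs.map (fun k => addA limit k m)).sum := by
  intro hs
  induction hs with
  | nil => intro D; simp
  | cons a hs ih =>
    intro D
    rw [List.foldl_cons, ih, List.map_cons, List.sum_cons, sieveStep,
      getD_foldl_modify_mul, addA]
    ring

-- one satisfier: sum of a filter over a nodup list when the predicate has a unique solution
lemma sum_filter_eq_of_unique (p : Int → Bool) (x : Int) (hx : ∀ y, p y = true ↔ y = x) :
    ∀ (l : List Int), l.Nodup → (l.filter p).sum = if x ∈ l then x else 0 := by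
  intro l
  induction l with
  | nil => intro _; simp
  | cons a l ih =>
    intro hnd
    rcases List.nodup_cons.mp hnd with ⟨ha, hl⟩
    rw [List.filter_cons]
    by_cases hpa : p a = true
    · have hax : a = x := (hx a).mp hpa
      subst hax
      rw [if_pos hpa, List.sum_cons, ih hl, if_neg ha, if_pos (List.mem_cons_self ..)]
      ring
    · have hne : a ≠ x := fun h => hpa ((hx a).mpr h)
      rw [if_neg hpa, ih hl]
      by_cases hxl : x ∈ l <;> simp [hxl, List.mem_cons, Ne.symm hne]

lemma addA_eval (limit k h : Int) (hk1 : 1 ≤ k) (hkh : k ≤ h) (hhl : h ≤ limit) :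
    addA limit k h = if k ∣ h then PySem.Int.floordiv h k else 0 := by
  have hk0 : (0 : Int) < k := by omega
  by_cases hdvd : k ∣ h
  · obtain ⟨e0, he0⟩ := hdvd
    have hfd : PySem.Int.floordiv h k = e0 := by
      rw [PySem.Int.floordiv_eq_ediv_of_pos hk0, he0, Int.mul_ediv_cancel_left _ (by omega)]
    have huniq : ∀ y : Int, (k * y == h) = true ↔ y = e0 := by
      intro y
      rw [beq_iff_eq, he0]
      exact ⟨fun hy => mul_left_cancel₀ (by omega) hy, fun hy => by rw [hy]⟩
    have he1 : 1 ≤ e0 := by nlinarith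
    have he2 : e0 ≤ PySem.Int.floordiv limit k := by
      rw [PySem.Int.le_floordiv_iff_mul_le hk0]
      nlinarith
    rw [addA, sum_filter_eq_of_unique _ e0 huniq _ (PySem.List.nodup_pyRange_one 1 _),
      if_pos (PySem.List.mem_pyRange_one.mpr ⟨he1, by omega⟩), if_pos ⟨e0, he0⟩, hfd]
  · have hnone : ∀ y ∈ PySem.List.pyRange 1 (PySem.Int.floordiv limit k + 1) 1,
        ¬ ((fun e => k * e == h) y = true) := by
      intro y _ hy
      exact hdvd ⟨y, (beq_iff_eq.mp hy).symm⟩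
    rw [addA, List.filter_eq_nil_iff.mpr hnone, List.sum_nil, if_neg hdvd]

lemma list_range_sum (f : Nat → Int) : ∀ n : Nat, ((List.range n).map f).sum = ∑ i ∈ Finset.range n, f i := by
  intro n
  induction n with
  | zero => simp
  | succ n ih => simp [List.range_succ, Finset.sum_range_succ, ih]

lemma divisor_sum_eval (n : Nat) (hn : 1 ≤ n) :
    ∑ k ∈ Finset.Icc 1 n, (if k ∣ n then ((n / k : Nat) : Int) else 0) = ((sigN n : Nat) : Int) := by
  have hn0 : n ≠ 0 := by omega
  have hfil : (Finset.Icc 1 n).filter (fun k => k ∣ n) = n.divisors := by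
    ext x
    simp only [Finset.mem_filter, Finset.mem_Icc, Nat.mem_divisors]
    constructor
    · rintro ⟨-, hdvd⟩; exact ⟨hdvd, hn0⟩
    · rintro ⟨hdvd, -⟩
      exact ⟨⟨Nat.pos_of_dvd_of_pos hdvd (by omega), Nat.le_of_dvd (by omega) hdvd⟩, hdvd⟩
  rw [← Finset.sum_filter, hfil]
  have : ∑ k ∈ n.divisors, ((n / k : Nat) : Int) = ((∑ k ∈ n.divisors, n / k : Nat) : Int) := by
    rw [Nat.cast_sum]
  have hdiv : ∑ k ∈ n.divisors, n / k = ∑ k ∈ n.divisors, k := by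
    simpa using Nat.sum_div_divisors n (fun d => d)
  rw [this, hdiv]
  rfl

lemma getD_eq_sigmaLoop (limit h : Int) (h1 : 1 ≤ h) (h2 : h ≤ limit) :
    (sievePrefix limit (h + 1)).getD h 0 = sigmaLoop (h.toNat + 1) h 1 0 := by
  have hcast : ((h.toNat : Nat) : Int) = h := Int.toNat_of_nonneg (by omega)
  set n : Nat := h.toNat with hn
  rw [sievePrefix, getD_sievePrefix_foldl, PySem.Dict.getD_empty, zero_add]
  have hcong : ∀ k ∈ PySem.List.pyRange 1 (h + 1) 1,
      (fun k => addA limit k h) k = (fun k => if k ∣ h then PySem.Int.floordiv h k else 0) k := by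
    intro k hk
    obtain ⟨hk1, hk2⟩ := PySem.List.mem_pyRange_one.mp hk
    exact addA_eval limit k h hk1 (by omega) h2
  rw [List.map_congr_left hcong, PySem.List.pyRange_one, List.map_map]
  have hlen : ((h + 1) - 1).toNat = n := by omega
  rw [hlen, list_range_sum]
  have hsum : ∑ i ∈ Finset.range n,
      ((fun k => if k ∣ h then PySem.Int.floordiv h k else 0) ∘ (fun k : Nat => (1 : Int) + k)) i
      = ∑ k ∈ Finset.Icc 1 n, (if k ∣ n then ((n / k : Nat) : Int) else 0) := by
    have hIccIco : Finset.Icc 1 n = Finset.Ico 1 (n + 1) := by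
      ext x; simp only [Finset.mem_Icc, Finset.mem_Ico]; omega
    rw [hIccIco, Finset.sum_Ico_eq_sum_range]
    simp only [Nat.add_sub_cancel]
    apply Finset.sum_congr rfl
    intro i _
    simp only [Function.comp]
    have hc1 : ((1 : Int) + (i : Int)) = (((1 + i : Nat)) : Int) := by push_cast; ring
    rw [← hcast, hc1]
    by_cases hd : (1 + i) ∣ n
    · rw [if_pos (Int.natCast_dvd_natCast.mpr hd), if_pos hd, PySem.Int.floordiv_natCast]
    · rw [if_neg (fun hc => hd (Int.natCast_dvd_natCast.mp hc)), if_neg hd]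
  rw [hsum, divisor_sum_eval n (by omega), ← hcast, sigmaLoop_eq n (by omega)]

lemma go_eq : ∀ (c : Nat) (h limit t : Int), 1 ≤ h → (limit - h).toNat = c →
    goA (PySem.List.pyRange h limit 1) limit t (sievePrefix limit h)
      = goB (PySem.List.pyRange h limit 1) t := by
  intro c
  induction c with
  | zero =>
    intro h limit t h1 hc
    rw [PySem.List.pyRange_one_eq_nil (by omega)]
    rfl
  | succ c ih =>
    intro h limit t h1 hc
    have hlt : h < limit := by omega
    rw [PySem.List.pyRange_one_cons hlt]
    have hstep : ((PySem.List.pyRange 1 (PySem.Int.floordiv limit h + 1) 1).foldl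
        (fun d elf => d.modify (h * elf) 0 (· + elf)) (sievePrefix limit h))
          = sievePrefix limit (h + 1) := by
      rw [sievePrefix, sievePrefix, PySem.List.pyRange_one_succ_right h1,
        List.foldl_append, List.foldl_cons, List.foldl_nil]
      rfl
    simp only [goA, goB, hstep, getD_eq_sigmaLoop limit h h1 (le_of_lt hlt)]
    by_cases hcond : sigmaLoop (h.toNat + 1) h 1 0 ≥ t
    · rw [if_pos hcond, if_pos hcond]
    · rw [if_neg hcond, if_neg hcond]
      exact ih (h + 1) limit t (by omega) (by omega)

-- ===== VERDICT (by name: the statement is the Claim_ definition above) =====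
theorem level20_1_spec : Claim_equal_level20_1 := by
  intro t _
  unfold Spec_level20_1 level20_1 level20_1_alt
  have h := go_eq (min 1000000 (PySem.Int.floordiv t 10) - 1).toNat 1
    (min 1000000 (PySem.Int.floordiv t 10)) (PySem.Int.floordiv t 10) le_rfl rfl
  simpa [sievePrefix, PySem.List.pyRange_one_eq_nil (le_refl (1 : Int))] using h
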